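-- pv_equiv track=rewrite | github.com/branaj05/Math-Modeling | ECC_Log_Problem_III.py | modgroup
-- ===== SOURCE A (Python) =====
-- def modgroup(a, n):
--     # creates cyclic group of a % mod
--     i = 0
--     group = []
--     m = 0
--     i = 0
--     while True:
--         val = (a*m)%n
--         if i >= 1 and val == 0:
--             break
--         group.append(val)
--         i+= 1
--         m+= 1
--     return group
-- ===== SOURCE B (Python) =====
-- import math
--
-- def modgroup(a, n):
--     # closed form: the cycle length is |n| // gcd(a, n); no cycle detection needed
--     a = a % n
--     L = abs(n) // math.gcd(a, n)
--     return [(a * m) % n for m in range(L)]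
-- ===== Notes on version B (the rewrite author's own statement) =====
-- stated objective: simpler
-- what changed: Replaces the cycle-detection while-loop with the closed-form cycle length |n| // gcd(a % n, n) computed once, then a single fixed-length comprehension over range(L).
import Mathlib
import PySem

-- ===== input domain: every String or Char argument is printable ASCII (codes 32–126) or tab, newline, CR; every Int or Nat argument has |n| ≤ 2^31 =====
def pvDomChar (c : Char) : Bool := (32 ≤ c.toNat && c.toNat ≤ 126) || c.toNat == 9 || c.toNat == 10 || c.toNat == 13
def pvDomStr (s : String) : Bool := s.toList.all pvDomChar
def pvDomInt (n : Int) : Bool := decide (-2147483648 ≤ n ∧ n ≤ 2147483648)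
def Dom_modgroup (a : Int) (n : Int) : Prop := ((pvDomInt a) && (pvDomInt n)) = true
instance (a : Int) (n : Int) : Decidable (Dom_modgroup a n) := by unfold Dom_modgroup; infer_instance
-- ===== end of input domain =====

-- B replaces A's cycle-detection loop by the closed-form cycle length |n| // gcd(a % n, n)
-- and one fixed-length pass; same values, no per-step termination test.

-- ===== PORT A =====
-- the 'while True' loop of A; fuel only makes it total, the break is the real exit
-- (for n ≠ 0 the break fires after at most |n| steps, so fuel |n|+1 is never exhausted)
def modgroupLoop (a : Int) (n : Int) (i : Nat) (m : Nat) (group : List Int) (fuel : Nat) : List Int :=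
  match fuel with
  | 0 => group
  | fuel + 1 =>
    let val := PySem.Int.mod (a * (m : Int)) n
    if 1 ≤ i ∧ val = 0 then group
    else modgroupLoop a n (i + 1) (m + 1) (group ++ [val]) fuel

def modgroup (a : Int) (n : Int) : List Int :=
  modgroupLoop a n 0 0 [] (n.natAbs + 1)

-- ===== PORT B =====
def modgroup_alt (a : Int) (n : Int) : List Int :=
  -- a' = a % n, L = abs(n) // math.gcd(a', n), then [(a'*m) % n for m in range(L)]
  (List.range (n.natAbs / Int.gcd (PySem.Int.mod a n) n)).map
    (fun m => PySem.Int.mod (PySem.Int.mod a n * (m : Int)) n)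

-- ===== PRECONDITION & SPEC =====
-- Pre_ excludes exactly n = 0, where Python A raises ZeroDivisionError.
def Pre_modgroup (_a : Int) (n : Int) : Prop := n ≠ 0
instance (a : Int) (n : Int) : Decidable (Pre_modgroup a n) := by unfold Pre_modgroup; infer_instance
def pvWitness_modgroup : Int × Int := (3, 7)

def Spec_modgroup (a : Int) (n : Int) (out : List Int) : Prop := out = modgroup_alt a n
instance (a : Int) (n : Int) (out : List Int) : Decidable (Spec_modgroup a n out) := by unfold Spec_modgroup; infer_instance

-- ===== CLAIM (what is proved, stated in full; the proofs are below) =====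
def Claim_equal_modgroup : Prop := ∀ (a : Int) (n : Int), Dom_modgroup a n → Pre_modgroup a n → Spec_modgroup a n (modgroup a n)

-- ===== LEMMAS AND PROOFS =====

-- Python's % is constant on residue classes (n ≠ 0)
theorem pymod_congr (x y n : Int) (hn : n ≠ 0) (h : n ∣ x - y) :
    PySem.Int.mod x n = PySem.Int.mod y n := by
  have hx := PySem.Int.floordiv_mul_add_mod x n
  have hy := PySem.Int.floordiv_mul_add_mod y n
  have hd : n ∣ (PySem.Int.mod x n - PySem.Int.mod y n) := by
    have heq : PySem.Int.mod x n - PySem.Int.mod y n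
        = (x - y) - (PySem.Int.floordiv x n - PySem.Int.floordiv y n) * n := by ring_nf; omega
    rw [heq]
    exact dvd_sub h (dvd_mul_left n _)
  have hz : PySem.Int.mod x n - PySem.Int.mod y n = 0 := by
    apply Int.eq_zero_of_dvd_of_natAbs_lt_natAbs hd
    rcases lt_or_gt_of_ne hn with h1 | h1
    · have bx := PySem.Int.mod_neg_bounds x h1
      have by' := PySem.Int.mod_neg_bounds y h1
      omega
    · have bx1 := PySem.Int.mod_nonneg x h1
      have bx2 := PySem.Int.mod_lt x h1
      have by1 := PySem.Int.mod_nonneg y h1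
      have by2 := PySem.Int.mod_lt y h1
      omega
  omega

-- N ∣ A*m  ↔  N/gcd(A,N) ∣ m   (over Nat, N ≠ 0)
theorem nat_dvd_mul_iff (A N m : Nat) (hN : N ≠ 0) :
    N ∣ A * m ↔ N / Nat.gcd A N ∣ m := by
  set g := Nat.gcd A N with hg
  have hgpos : 0 < g := Nat.gcd_pos_of_pos_right A (Nat.pos_of_ne_zero hN)
  have hgA : g ∣ A := Nat.gcd_dvd_left A N
  have hgN : g ∣ N := Nat.gcd_dvd_right A N
  constructor
  · intro h
    have hco : Nat.Coprime (A / g) (N / g) := Nat.coprime_div_gcd_div_gcd hgpos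
    have h2 : g * (N / g) ∣ g * ((A / g) * m) := by
      have e1 : g * (N / g) = N := Nat.mul_div_cancel' hgN
      have e2 : g * ((A / g) * m) = A * m := by
        rw [← Nat.mul_assoc, Nat.mul_div_cancel' hgA]
      rw [e1, e2]; exact h
    have h3 : N / g ∣ (A / g) * m := (Nat.mul_dvd_mul_iff_left hgpos).mp h2
    exact Nat.Coprime.dvd_of_dvd_mul_left hco.symm h3
  · intro h
    obtain ⟨t, ht⟩ := h
    refine ⟨(A / g) * t, ?_⟩
    calc A * m = A * (N / g * t) := by rw [ht]
    _ = (A / g * g) * (N / g * t) := by rw [Nat.div_mul_cancel hgA]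
    _ = N * (A / g * t) := by
        rw [show A / g * g * (N / g * t) = (g * (N / g)) * (A / g * t) by ring,
            Nat.mul_div_cancel' hgN]

-- the break test of A's loop: (a*m) % n = 0 ↔ L ∣ m, where L = |n| / gcd(a, n)
theorem break_iff (a n : Int) (hn : n ≠ 0) (m : Nat) :
    PySem.Int.mod (a * (m : Int)) n = 0 ↔ n.natAbs / Int.gcd a n ∣ m := by
  rw [PySem.Int.mod_eq_zero_iff_dvd]
  have hN : n.natAbs ≠ 0 := by simpa using hn
  have h1 : n ∣ a * (m : Int) ↔ n.natAbs ∣ (a * (m : Int)).natAbs := by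
    rw [Int.natAbs_dvd_natAbs]
  rw [h1, Int.natAbs_mul, Int.natAbs_natCast]
  exact nat_dvd_mul_iff a.natAbs n.natAbs m hN

-- the loop, started at step j ≤ L with i = m = j, appends the remaining L - j values
theorem loop_eq (a n : Int) (hn : n ≠ 0) :
    ∀ (fuel j : Nat) (G : List Int),
      j ≤ n.natAbs / Int.gcd a n → n.natAbs / Int.gcd a n - j < fuel →
      modgroupLoop a n j j G fuel
        = G ++ (List.range' j (n.natAbs / Int.gcd a n - j)).map
            (fun m => PySem.Int.mod (a * (m : Int)) n) := by
  set L := n.natAbs / Int.gcd a n with hL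
  have hL1 : 1 ≤ L := by
    apply Nat.div_pos
    · exact Nat.le_of_dvd (by simpa using hn : 0 < n.natAbs) (Int.gcd_dvd_natAbs_right a n)
    · exact Int.gcd_pos_of_ne_zero_right a hn
  intro fuel
  induction fuel with
  | zero => intro j G hj hf; omega
  | succ fuel ih =>
    intro j G hj hf
    by_cases hjL : j = L
    · have hv : PySem.Int.mod (a * (j : Int)) n = 0 :=
        (break_iff a n hn j).mpr (by rw [hjL])
      have h0 : L - j = 0 := by omega
      rw [modgroupLoop]
      simp [hv, h0, show 1 ≤ j by omega]
    · have hjlt : j < L := lt_of_le_of_ne hj hjL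
      have hv : ¬ (1 ≤ j ∧ PySem.Int.mod (a * (j : Int)) n = 0) := by
        rintro ⟨hj1, hv0⟩
        have := (break_iff a n hn j).mp hv0
        have := Nat.le_of_dvd (by omega) this
        omega
      rw [modgroupLoop]
      simp only [hv, if_false]
      rw [ih (j + 1) (G ++ [PySem.Int.mod (a * (j : Int)) n]) (by omega) (by omega)]
      obtain ⟨k, hk⟩ : ∃ k, L - j = k + 1 := ⟨L - j - 1, by omega⟩
      rw [show L - (j + 1) = k from by omega, hk, List.range'_succ]
      simp

-- gcd(a % n, n) = gcd(a, n)
theorem gcd_mod_eq (a n : Int) : Int.gcd (PySem.Int.mod a n) n = Int.gcd a n := by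
  have h : PySem.Int.mod a n = a - PySem.Int.floordiv a n * n := by
    have := PySem.Int.floordiv_mul_add_mod a n; omega
  rw [h]
  exact Int.gcd_sub_mul_right_left n a (PySem.Int.floordiv a n)

-- ===== VERDICT (by name: the statement is the Claim_ definition above) =====
theorem modgroup_spec : Claim_equal_modgroup := by
  intro a n _ hn
  unfold Spec_modgroup modgroup modgroup_alt
  rw [loop_eq a n hn (n.natAbs + 1) 0 [] (Nat.zero_le _)
      (by have h := Nat.div_le_self n.natAbs (Int.gcd a n); omega)]
  rw [gcd_mod_eq a n]
  rw [Nat.sub_zero, List.nil_append, ← List.range_eq_range']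
  apply List.map_congr_left
  intro m _
  apply pymod_congr _ _ n hn
  have h : n ∣ a - PySem.Int.mod a n := by
    have := PySem.Int.floordiv_mul_add_mod a n
    exact ⟨PySem.Int.floordiv a n, by linarith⟩
  have heq : a * (m : Int) - PySem.Int.mod a n * (m : Int)
      = (a - PySem.Int.mod a n) * (m : Int) := by ring
  rw [heq]
  exact Dvd.dvd.mul_right h _
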